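-- pv_equiv track=rewrite | github.com/alexandraback/datacollection | solutions_1595491_1/Python/tzador/solution.py | solve
-- ===== SOURCE A (Python) =====
-- def is_possible(total, p):
--   possible = False
--   without_special = False
--   for i in range(0, 11):
--     for j in range(0, 11):
--       for k in range(0, 11):
--         if i + j + k != total:
--           continue
--         best = max(i, j, k)
--         worst = min(i, j, k)
--         diff = best - worst
--         if diff > 2:
--           continue
--         if best < p:
--           continue
--         possible = True
--         if diff <= 1:
--          without_special = True
--   needs_special = not without_special
--   return (possible, needs_special)
--
-- def solve(S, p, totals):
--   without_special_count = 0
--   with_special_count = 0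
--   for total in totals:
--     (possible, needs_special) = is_possible(total, p)
--
--     if possible:
--       if needs_special:
--         with_special_count += 1
--       else:
--         without_special_count += 1
--
--   return without_special_count + min(with_special_count, S)
-- ===== SOURCE B (Python) =====
-- def solve(S, p, totals):
--     without_special_count = 0
--     with_special_count = 0
--     for t in totals:
--         if 0 <= t <= 30:
--             if p <= min(10, (t + 2) // 3):
--                 without_special_count += 1
--             elif p <= min(10, (t + 4) // 3, t):
--                 with_special_count += 1
--     return without_special_count + min(with_special_count, S)
-- ===== Notes on version B (the rewrite author's own statement) =====
-- stated objective: faster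
-- what changed: B replaces A's 11x11x11 brute-force enumeration of dart triples per total with a closed-form O(1) arithmetic test per total (p <= min(10,(t+2)//3) for no-special, else p <= min(10,(t+4)//3,t) for with-special).
import Mathlib
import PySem

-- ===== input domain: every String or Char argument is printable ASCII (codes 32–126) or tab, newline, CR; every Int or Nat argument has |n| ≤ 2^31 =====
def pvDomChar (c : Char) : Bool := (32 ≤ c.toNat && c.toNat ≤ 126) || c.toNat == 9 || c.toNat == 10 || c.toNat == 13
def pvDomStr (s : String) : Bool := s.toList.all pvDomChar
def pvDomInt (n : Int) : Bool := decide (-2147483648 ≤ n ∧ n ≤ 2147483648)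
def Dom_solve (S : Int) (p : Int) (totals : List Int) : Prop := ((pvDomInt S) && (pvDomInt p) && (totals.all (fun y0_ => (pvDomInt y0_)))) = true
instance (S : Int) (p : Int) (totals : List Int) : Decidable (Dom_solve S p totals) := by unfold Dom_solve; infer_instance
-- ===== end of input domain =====

-- B replaces A's 1331-triple brute force per total with a closed-form arithmetic test per total (faster by a large constant factor).

-- ===== PORT A =====
-- literal transliteration of is_possible: triple loop over range(0,11) maintaining (possible, without_special)
def isPossible (total : Int) (p : Int) : Bool × Bool :=
  let st := (PySem.List.pyRange 0 11 1).foldl (fun st1 i =>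
    (PySem.List.pyRange 0 11 1).foldl (fun st2 j =>
      (PySem.List.pyRange 0 11 1).foldl (fun st3 k =>
        if i + j + k ≠ total then st3
        else
          let best := max i (max j k)
          let worst := min i (min j k)
          let diff := best - worst
          if diff > 2 then st3
          else if best < p then st3
          else (true, if diff ≤ 1 then true else st3.2)
      ) st2) st1) (false, false)
  (st.1, !st.2)   -- needs_special = not without_special

def solve (S : Int) (p : Int) (totals : List Int) : Int :=
  let st := totals.foldl (fun (acc : Int × Int) total =>
    let r := isPossible total p
    if r.1 then
      (if r.2 then (acc.1, acc.2 + 1) else (acc.1 + 1, acc.2))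
    else acc) (0, 0)
  st.1 + min st.2 S

-- ===== PORT B =====
def solve_alt (S : Int) (p : Int) (totals : List Int) : Int :=
  let st := totals.foldl (fun (acc : Int × Int) t =>
    if 0 ≤ t ∧ t ≤ 30 then
      if p ≤ min 10 (PySem.Int.floordiv (t + 2) 3) then (acc.1 + 1, acc.2)
      else if p ≤ min (min 10 (PySem.Int.floordiv (t + 4) 3)) t then (acc.1, acc.2 + 1)
      else acc
    else acc) (0, 0)
  st.1 + min st.2 S

-- ===== PRECONDITION & SPEC =====
def Spec_solve (S : Int) (p : Int) (totals : List Int) (out : Int) : Prop := out = solve_alt S p totals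
instance (S : Int) (p : Int) (totals : List Int) (out : Int) : Decidable (Spec_solve S p totals out) := by unfold Spec_solve; infer_instance

-- ===== CLAIM (what is proved, stated in full; the proofs are below) =====
def Claim_equal_solve : Prop := ∀ (S : Int) (p : Int) (totals : List Int), Dom_solve S p totals → Spec_solve S p totals (solve S p totals)

-- ===== LEMMAS AND PROOFS =====

-- B's two per-total tests, as Booleans (proof helpers)
def condA (t p : Int) : Bool := decide (0 ≤ t ∧ t ≤ 30 ∧ p ≤ min 10 (PySem.Int.floordiv (t + 2) 3))
def condB (t p : Int) : Bool := decide (0 ≤ t ∧ t ≤ 30 ∧ p ≤ min (min 10 (PySem.Int.floordiv (t + 4) 3)) t)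

-- clamps: isPossible and the conds only depend on t through [-1..31] and on p through [0..11]
def clampT (t : Int) : Int := if t < 0 ∨ 30 < t then -1 else t
def clampP (p : Int) : Int := if p < 0 then 0 else if 11 < p then 11 else p

lemma isPossible_clamp (t p : Int) : isPossible t p = isPossible (clampT t) (clampP p) := by
  unfold isPossible
  have h : (PySem.List.pyRange 0 11 1).foldl (fun st1 i =>
      (PySem.List.pyRange 0 11 1).foldl (fun st2 j =>
        (PySem.List.pyRange 0 11 1).foldl (fun st3 k =>
          if i + j + k ≠ t then st3
          else
            let best := max i (max j k)
            let worst := min i (min j k)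
            let diff := best - worst
            if diff > 2 then st3
            else if best < p then st3
            else (true, if diff ≤ 1 then true else st3.2)
        ) st2) st1) ((false, false) : Bool × Bool)
      = (PySem.List.pyRange 0 11 1).foldl (fun st1 i =>
      (PySem.List.pyRange 0 11 1).foldl (fun st2 j =>
        (PySem.List.pyRange 0 11 1).foldl (fun st3 k =>
          if i + j + k ≠ clampT t then st3
          else
            let best := max i (max j k)
            let worst := min i (min j k)
            let diff := best - worst
            if diff > 2 then st3
            else if best < clampP p then st3
            else (true, if diff ≤ 1 then true else st3.2)
        ) st2) st1) ((false, false) : Bool × Bool) := by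
    apply PySem.List.foldl_congr_mem'
    intro i hi st1
    apply PySem.List.foldl_congr_mem'
    intro j hj st2
    apply PySem.List.foldl_congr_mem'
    intro k hk st3
    rw [PySem.List.mem_pyRange_one] at hi hj hk
    have e1 : (i + j + k ≠ t) ↔ (i + j + k ≠ clampT t) := by
      unfold clampT; split_ifs <;> omega
    have e2 : (max i (max j k) < p) ↔ (max i (max j k) < clampP p) := by
      unfold clampP
      rcases le_total i j with h1 | h1 <;> rcases le_total j k with h2 | h2 <;>
        rcases le_total i k with h3 | h3 <;>
        simp [h1, h2, h3] <;> split_ifs <;> omega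
    simp only [e1, e2]
  rw [h]

lemma condA_clamp (t p : Int) : condA t p = condA (clampT t) (clampP p) := by
  unfold condA clampT clampP
  simp only [PySem.Int.floordiv_eq_ediv_of_pos (by norm_num : (0:Int) < 3), decide_eq_decide,
    le_min_iff]
  split_ifs <;> omega

lemma condB_clamp (t p : Int) : condB t p = condB (clampT t) (clampP p) := by
  unfold condB clampT clampP
  simp only [PySem.Int.floordiv_eq_ediv_of_pos (by norm_num : (0:Int) < 3), decide_eq_decide,
    le_min_iff]
  split_ifs <;> omega

set_option maxHeartbeats 4000000 in
set_option maxRecDepth 10000 in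
lemma grid : ∀ t ∈ PySem.List.pyRange (-1) 32 1, ∀ p ∈ PySem.List.pyRange 0 12 1,
    isPossible t p = ((condA t p || condB t p), !condA t p) := by decide

lemma isPossible_eq (t p : Int) : isPossible t p = ((condA t p || condB t p), !condA t p) := by
  rw [isPossible_clamp, condA_clamp, condB_clamp]
  exact grid (clampT t) (by rw [PySem.List.mem_pyRange_one]; unfold clampT; split_ifs <;> omega)
    (clampP p) (by rw [PySem.List.mem_pyRange_one]; unfold clampP; split_ifs <;> omega)

lemma step_eq (p : Int) (acc : Int × Int) (t : Int) :
    (let r := isPossible t p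
     if r.1 then (if r.2 then (acc.1, acc.2 + 1) else (acc.1 + 1, acc.2)) else acc)
    = (if 0 ≤ t ∧ t ≤ 30 then
        if p ≤ min 10 (PySem.Int.floordiv (t + 2) 3) then (acc.1 + 1, acc.2)
        else if p ≤ min (min 10 (PySem.Int.floordiv (t + 4) 3)) t then (acc.1, acc.2 + 1)
        else acc
      else acc) := by
  rw [isPossible_eq]
  unfold condA condB
  simp only [PySem.Int.floordiv_eq_ediv_of_pos (by norm_num : (0:Int) < 3), le_min_iff,
    Bool.or_eq_true, Bool.not_eq_true', decide_eq_true_eq, decide_eq_false_iff_not]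
  split_ifs <;> first | rfl | omega

-- ===== VERDICT (by name: the statement is the Claim_ definition above) =====
theorem solve_spec : Claim_equal_solve := by
  intro S p totals _
  unfold Spec_solve solve solve_alt
  have h : totals.foldl (fun (acc : Int × Int) total =>
      let r := isPossible total p
      if r.1 then (if r.2 then (acc.1, acc.2 + 1) else (acc.1 + 1, acc.2)) else acc) (0, 0)
      = totals.foldl (fun (acc : Int × Int) t =>
      if 0 ≤ t ∧ t ≤ 30 then
        if p ≤ min 10 (PySem.Int.floordiv (t + 2) 3) then (acc.1 + 1, acc.2)
        else if p ≤ min (min 10 (PySem.Int.floordiv (t + 4) 3)) t then (acc.1, acc.2 + 1)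
        else acc
      else acc) (0, 0) := by
    apply PySem.List.foldl_congr_mem'
    intro t _ acc
    exact step_eq p acc t
  rw [h]
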